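-- pv_equiv track=rewrite | github.com/YuchanJung/ps | string/[프로그래머스]Lv1. 118666. 성격 유형 검사하기/solution.py | solution
-- ===== SOURCE A (Python) =====
-- def solution(survey, choices):
--     answer = ''
--     type = {'R': 0, 'T': 0, 'C': 0, 'F': 0, 'J': 0, 'M': 0, 'A': 0, 'N': 0}
--     l = len(survey)
--     for i in range(l):
--         if choices[i] < 4:
--             type[survey[i][0]] += 4 - choices[i]
--         elif choices[i] > 4:
--             type[survey[i][1]] += choices[i] - 4
--         else:
--             pass
--
--
--     if type['R'] >= type['T']: answer += 'R'
--     else: answer += 'T'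
--
--     if type['C'] >= type['F']: answer += 'C'
--     else: answer += 'F'
--
--     if type['J'] >= type['M']: answer += 'J'
--     else: answer += 'M'
--
--     if type['A'] >= type['N']: answer += 'A'
--     else: answer += 'N'
--
--     return answer
-- ===== SOURCE B (Python) =====
-- def solution(survey, choices):
--     # Four independent passes, one per indicator pair: each pair's verdict is a
--     # pure signed sum over the data (positive favours the first letter); no dict.
--     def score(a, b, s, c):
--         if c < 4:
--             return (4 - c) if s[0] == a else -(4 - c) if s[0] == b else 0
--         if c > 4:
--             return (c - 4) if s[1] == a else -(c - 4) if s[1] == b else 0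
--         return 0
--     return ''.join(a if sum(score(a, b, s, c) for s, c in zip(survey, choices)) >= 0 else b
--                    for a, b in ('RT', 'CF', 'JM', 'AN'))
-- ===== Notes on version B (the rewrite author's own statement) =====
-- stated objective: alternative
-- what changed: B drops A's mutable eight-counter dict entirely: it makes four independent passes, one per indicator pair, each reducing zip(survey,choices) to one pure signed sum (positive favours the first letter) and emitting that pair's letter by the sum's sign.
import Mathlib
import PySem

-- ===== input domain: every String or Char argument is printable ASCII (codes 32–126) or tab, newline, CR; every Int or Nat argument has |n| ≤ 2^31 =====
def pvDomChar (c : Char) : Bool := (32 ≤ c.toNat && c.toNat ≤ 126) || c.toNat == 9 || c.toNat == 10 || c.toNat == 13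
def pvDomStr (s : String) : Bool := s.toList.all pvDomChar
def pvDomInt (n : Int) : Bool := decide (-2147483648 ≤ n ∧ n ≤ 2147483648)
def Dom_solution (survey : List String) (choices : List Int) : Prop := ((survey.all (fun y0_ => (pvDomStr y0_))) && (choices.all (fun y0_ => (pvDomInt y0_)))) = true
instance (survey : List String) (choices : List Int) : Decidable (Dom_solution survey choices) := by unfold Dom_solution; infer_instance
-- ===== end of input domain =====

-- B drops A's mutable eight-counter dict: four independent per-pair passes, each a pure
-- signed sum over zip(survey, choices); alternative decomposition, same cost.

-- ===== PORT A =====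
-- loop body of A, on the pair (survey[i], choices[i])
def stepA (d : PySem.Dict Char Int) (p : String × Int) : PySem.Dict Char Int :=
  if p.2 < 4 then
    let k := (PySem.Str.pyGet? p.1 0).getD ' '      -- survey[i][0]; Pre_ makes the index valid
    d.insert k (d.getD k 0 + (4 - p.2))             -- type[k] += 4 - choices[i] (key present under Pre_)
  else if p.2 > 4 then
    let k := (PySem.Str.pyGet? p.1 1).getD ' '      -- survey[i][1]
    d.insert k (d.getD k 0 + (p.2 - 4))
  else d

def solution (survey : List String) (choices : List Int) : String :=
  let typ0 : PySem.Dict Char Int :=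
    PySem.Dict.ofList [('R',0),('T',0),('C',0),('F',0),('J',0),('M',0),('A',0),('N',0)]
  let l : Int := PySem.List.len survey
  let typ := (PySem.List.pyRange 0 l 1).foldl
    (fun d i => stepA d (PySem.List.pyGetD survey i "", PySem.List.pyGetD choices i 0)) typ0
  let a1 : List Char := [] ++ (if typ.getD 'R' 0 ≥ typ.getD 'T' 0 then ['R'] else ['T'])
  let a2 := a1 ++ (if typ.getD 'C' 0 ≥ typ.getD 'F' 0 then ['C'] else ['F'])
  let a3 := a2 ++ (if typ.getD 'J' 0 ≥ typ.getD 'M' 0 then ['J'] else ['M'])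
  let a4 := a3 ++ (if typ.getD 'A' 0 ≥ typ.getD 'N' 0 then ['A'] else ['N'])
  String.ofList a4

-- ===== PORT B =====
-- B's per-item contribution to the pair (a, b): positive favours a
def pvScore (a b : Char) (s : String) (c : Int) : Int :=
  if c < 4 then
    if (PySem.Str.pyGet? s 0).getD ' ' == a then 4 - c
    else if (PySem.Str.pyGet? s 0).getD ' ' == b then -(4 - c) else 0
  else if c > 4 then
    if (PySem.Str.pyGet? s 1).getD ' ' == a then c - 4
    else if (PySem.Str.pyGet? s 1).getD ' ' == b then -(c - 4) else 0
  else 0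

def solution_alt (survey : List String) (choices : List Int) : String :=
  PySem.Str.join "" (([('R','T'),('C','F'),('J','M'),('A','N')] : List (Char × Char)).map
    (fun p =>
      if ((survey.zip choices).map (fun q => pvScore p.1 p.2 q.1 q.2)).sum ≥ 0
      then String.ofList [p.1] else String.ofList [p.2]))

-- ===== PRECONDITION & SPEC =====
def pvLetters : List Char := ['R','T','C','F','J','M','A','N']

-- Pre_ excludes exactly the inputs where Python A raises: choices shorter than survey
-- (IndexError), a survey entry too short for the index taken (IndexError), or an indexed
-- letter outside the eight indicator letters (KeyError).
def Pre_solution (survey : List String) (choices : List Int) : Prop :=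
  survey.length ≤ choices.length ∧
  ∀ p ∈ survey.zip choices,
    (p.2 < 4 → 1 ≤ p.1.toList.length ∧ p.1.toList.getD 0 ' ' ∈ pvLetters) ∧
    (4 < p.2 → 2 ≤ p.1.toList.length ∧ p.1.toList.getD 1 ' ' ∈ pvLetters)
instance (survey : List String) (choices : List Int) : Decidable (Pre_solution survey choices) := by
  unfold Pre_solution; infer_instance

def pvWitness_solution : List String × List Int := (["RT", "CF", "AN"], [1, 6, 4])

def Spec_solution (survey : List String) (choices : List Int) (out : String) : Prop :=
  out = solution_alt survey choices
instance (survey : List String) (choices : List Int) (out : String) : Decidable (Spec_solution survey choices out) := by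
  unfold Spec_solution; infer_instance

-- ===== CLAIM (what is proved, stated in full; the proofs are below) =====
def Claim_equal_solution : Prop := ∀ (survey : List String) (choices : List Int), Dom_solution survey choices → Pre_solution survey choices → Spec_solution survey choices (solution survey choices)

-- ===== LEMMAS AND PROOFS =====

-- the indexed loop of A reads exactly the zipped pairs
lemma pvMapRange_eq_zip (survey : List String) (choices : List Int)
    (h : survey.length ≤ choices.length) :
    (PySem.List.pyRange 0 (PySem.List.len survey) 1).map
      (fun i => (PySem.List.pyGetD survey i "", PySem.List.pyGetD choices i 0))
    = survey.zip choices := by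
  apply List.ext_getElem
  · simp [PySem.List.length_pyRange_one, PySem.List.len]
    omega
  · intro k hk1 hk2
    simp only [List.getElem_map, PySem.List.getElem_pyRange_one, zero_add]
    have hk : k < survey.length := by
      simpa [PySem.List.length_pyRange_one, PySem.List.len] using hk1
    have hkc : k < choices.length := by omega
    simp [List.getElem_zip, PySem.List.pyGetD_natCast, List.getD, hk, hkc]

-- one item: A's dict update changes each pair's counter difference by exactly B's score
lemma pvStep (s : String) (c : Int)
    (hp : (c < 4 → 1 ≤ s.toList.length ∧ s.toList.getD 0 ' ' ∈ pvLetters) ∧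
          (4 < c → 2 ≤ s.toList.length ∧ s.toList.getD 1 ' ' ∈ pvLetters))
    (da : PySem.Dict Char Int) :
    (stepA da (s, c)).getD 'R' 0 - (stepA da (s, c)).getD 'T' 0
      = da.getD 'R' 0 - da.getD 'T' 0 + pvScore 'R' 'T' s c ∧
    (stepA da (s, c)).getD 'C' 0 - (stepA da (s, c)).getD 'F' 0
      = da.getD 'C' 0 - da.getD 'F' 0 + pvScore 'C' 'F' s c ∧
    (stepA da (s, c)).getD 'J' 0 - (stepA da (s, c)).getD 'M' 0
      = da.getD 'J' 0 - da.getD 'M' 0 + pvScore 'J' 'M' s c ∧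
    (stepA da (s, c)).getD 'A' 0 - (stepA da (s, c)).getD 'N' 0
      = da.getD 'A' 0 - da.getD 'N' 0 + pvScore 'A' 'N' s c := by
  by_cases hc : c < 4
  · obtain ⟨hlen, hmem⟩ := hp.1 hc
    obtain ⟨k, hkd, hmem⟩ : ∃ k, s.toList.getD 0 ' ' = k ∧ k ∈ pvLetters := ⟨_, rfl, hmem⟩
    have hk : (PySem.Str.pyGet? s 0).getD ' ' = k := by
      rw [← hkd]; simp [PySem.List.pyGet?_zero, List.getD]
    simp only [pvLetters, List.mem_cons, List.not_mem_nil, or_false] at hmem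
    rcases hmem with rfl | rfl | rfl | rfl | rfl | rfl | rfl | rfl <;>
    · refine ⟨?_, ?_, ?_, ?_⟩ <;>
      · simp only [stepA, pvScore, hk]
        rw [if_pos (show (s, c).2 < 4 from hc), if_pos hc]
        simp [PySem.Dict.getD_insert]
        try omega
  · by_cases hc' : 4 < c
    · obtain ⟨hlen, hmem⟩ := hp.2 hc'
      obtain ⟨k, hkd, hmem⟩ : ∃ k, s.toList.getD 1 ' ' = k ∧ k ∈ pvLetters := ⟨_, rfl, hmem⟩
      have hk : (PySem.Str.pyGet? s 1).getD ' ' = k := by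
        rw [← hkd]
        have h1l : 1 < s.toList.length := by omega
        have h := PySem.List.pyGet?_ofNat s.toList 1 h1l
        rw [show ((1 : Nat) : Int) = (1 : Int) from rfl] at h
        simp [h, List.getD, List.getElem?_eq_getElem h1l]
      simp only [pvLetters, List.mem_cons, List.not_mem_nil, or_false] at hmem
      rcases hmem with rfl | rfl | rfl | rfl | rfl | rfl | rfl | rfl <;>
      · refine ⟨?_, ?_, ?_, ?_⟩ <;>
        · simp only [stepA, pvScore, hk]
          rw [if_neg (show ¬ (s, c).2 < 4 from hc), if_neg hc,
            if_pos (show (s, c).2 > 4 from hc'), if_pos hc']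
          simp [PySem.Dict.getD_insert]
          try omega
    · have hc4 : c = 4 := by omega
      subst hc4
      refine ⟨?_, ?_, ?_, ?_⟩ <;>
      · simp only [stepA, pvScore]
        norm_num

-- loop invariant: A's final counter differences equal B's per-pair sums (plus the start)
lemma pvInv (L : List (String × Int))
    (hL : ∀ p ∈ L,
      (p.2 < 4 → 1 ≤ p.1.toList.length ∧ p.1.toList.getD 0 ' ' ∈ pvLetters) ∧
      (4 < p.2 → 2 ≤ p.1.toList.length ∧ p.1.toList.getD 1 ' ' ∈ pvLetters))
    (da : PySem.Dict Char Int) :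
    (L.foldl stepA da).getD 'R' 0 - (L.foldl stepA da).getD 'T' 0
      = da.getD 'R' 0 - da.getD 'T' 0 + (L.map (fun q => pvScore 'R' 'T' q.1 q.2)).sum ∧
    (L.foldl stepA da).getD 'C' 0 - (L.foldl stepA da).getD 'F' 0
      = da.getD 'C' 0 - da.getD 'F' 0 + (L.map (fun q => pvScore 'C' 'F' q.1 q.2)).sum ∧
    (L.foldl stepA da).getD 'J' 0 - (L.foldl stepA da).getD 'M' 0
      = da.getD 'J' 0 - da.getD 'M' 0 + (L.map (fun q => pvScore 'J' 'M' q.1 q.2)).sum ∧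
    (L.foldl stepA da).getD 'A' 0 - (L.foldl stepA da).getD 'N' 0
      = da.getD 'A' 0 - da.getD 'N' 0 + (L.map (fun q => pvScore 'A' 'N' q.1 q.2)).sum := by
  induction L generalizing da with
  | nil => simp
  | cons p t ih =>
    obtain ⟨s, c⟩ := p
    have hp := hL (s, c) (List.mem_cons_self ..)
    obtain ⟨g1, g2, g3, g4⟩ := pvStep s c hp da
    obtain ⟨e1, e2, e3, e4⟩ := ih (fun q hq => hL q (List.mem_cons_of_mem _ hq)) (stepA da (s, c))
    simp only [List.foldl_cons, List.map_cons, List.sum_cons]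
    refine ⟨?_, ?_, ?_, ?_⟩ <;> omega

-- ===== VERDICT (by name: the statement is the Claim_ definition above) =====
theorem solution_spec : Claim_equal_solution := by
  intro survey choices _ hpre
  obtain ⟨hlen, hcond⟩ := hpre
  unfold Spec_solution solution solution_alt
  dsimp only
  rw [show (fun d i => stepA d (PySem.List.pyGetD survey i "", PySem.List.pyGetD choices i 0))
      = (fun d i => stepA d ((fun i => (PySem.List.pyGetD survey i "", PySem.List.pyGetD choices i 0)) i))
      from rfl, ← List.foldl_map, pvMapRange_eq_zip survey choices hlen]
  obtain ⟨e1, e2, e3, e4⟩ := pvInv (survey.zip choices) hcond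
    (PySem.Dict.ofList [('R',0),('T',0),('C',0),('F',0),('J',0),('M',0),('A',0),('N',0)])
  set ta := (survey.zip choices).foldl stepA
    (PySem.Dict.ofList [('R',0),('T',0),('C',0),('F',0),('J',0),('M',0),('A',0),('N',0)]) with hta
  have zR : (PySem.Dict.ofList [('R',(0:Int)),('T',0),('C',0),('F',0),('J',0),('M',0),('A',0),('N',0)]).getD 'R' 0 = 0 := by decide
  have zT : (PySem.Dict.ofList [('R',(0:Int)),('T',0),('C',0),('F',0),('J',0),('M',0),('A',0),('N',0)]).getD 'T' 0 = 0 := by decide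
  have zC : (PySem.Dict.ofList [('R',(0:Int)),('T',0),('C',0),('F',0),('J',0),('M',0),('A',0),('N',0)]).getD 'C' 0 = 0 := by decide
  have zF : (PySem.Dict.ofList [('R',(0:Int)),('T',0),('C',0),('F',0),('J',0),('M',0),('A',0),('N',0)]).getD 'F' 0 = 0 := by decide
  have zJ : (PySem.Dict.ofList [('R',(0:Int)),('T',0),('C',0),('F',0),('J',0),('M',0),('A',0),('N',0)]).getD 'J' 0 = 0 := by decide
  have zM : (PySem.Dict.ofList [('R',(0:Int)),('T',0),('C',0),('F',0),('J',0),('M',0),('A',0),('N',0)]).getD 'M' 0 = 0 := by decide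
  have zA : (PySem.Dict.ofList [('R',(0:Int)),('T',0),('C',0),('F',0),('J',0),('M',0),('A',0),('N',0)]).getD 'A' 0 = 0 := by decide
  have zN : (PySem.Dict.ofList [('R',(0:Int)),('T',0),('C',0),('F',0),('J',0),('M',0),('A',0),('N',0)]).getD 'N' 0 = 0 := by decide
  simp only [zR, zT, zC, zF, zJ, zM, zA, zN] at e1 e2 e3 e4
  simp only [List.map_cons, List.map_nil]
  have c1 : (((survey.zip choices).map (fun q => pvScore 'R' 'T' q.1 q.2)).sum ≥ 0)
      = (ta.getD 'R' 0 ≥ ta.getD 'T' 0) := by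
    apply propext; constructor <;> intro <;> omega
  have c2 : (((survey.zip choices).map (fun q => pvScore 'C' 'F' q.1 q.2)).sum ≥ 0)
      = (ta.getD 'C' 0 ≥ ta.getD 'F' 0) := by
    apply propext; constructor <;> intro <;> omega
  have c3 : (((survey.zip choices).map (fun q => pvScore 'J' 'M' q.1 q.2)).sum ≥ 0)
      = (ta.getD 'J' 0 ≥ ta.getD 'M' 0) := by
    apply propext; constructor <;> intro <;> omega
  have c4 : (((survey.zip choices).map (fun q => pvScore 'A' 'N' q.1 q.2)).sum ≥ 0)
      = (ta.getD 'A' 0 ≥ ta.getD 'N' 0) := by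
    apply propext; constructor <;> intro <;> omega
  simp only [c1, c2, c3, c4]
  by_cases b1 : ta.getD 'R' 0 ≥ ta.getD 'T' 0 <;>
  by_cases b2 : ta.getD 'C' 0 ≥ ta.getD 'F' 0 <;>
  by_cases b3 : ta.getD 'J' 0 ≥ ta.getD 'M' 0 <;>
  by_cases b4 : ta.getD 'A' 0 ≥ ta.getD 'N' 0 <;>
  · simp only [b1, b2, b3, b4, if_true, if_false]
    rfl
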